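-- pv_equiv track=rewrite | github.com/thenatzzz/Qsearch_MSc_Final_project | VISUALIZE_MODEL_CHART/CREATE_AREA_CHART.py | format_list_episode
-- ===== SOURCE A (Python) =====
-- def format_list_episode(normal_list, episode_list, episode_interval):
--     temp_list = []
--     count = 0
--     count_interval = 0
--     while count < len(normal_list):
--
--         previous_count = count
--         count += episode_interval
--         if count > len(normal_list):
--             episode_interval = len(normal_list) - previous_count
--         for i in range(episode_interval):
--             temp_list.append(episode_list[count_interval])
--         count_interval += 1
--
--     return temp_list
-- ===== SOURCE B (Python) =====
-- def format_list_episode(normal_list, episode_list, episode_interval):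
--     # Output position i always belongs to chunk i // episode_interval.
--     return [episode_list[i // episode_interval] for i in range(len(normal_list))]
-- ===== Notes on version B (the rewrite author's own statement) =====
-- stated objective: simpler
-- what changed: Replaces the nested while/for chunk-copy loop with its mutable count/count_interval/interval bookkeeping by one flat pass that computes each output element directly as episode_list[i // episode_interval].
import Mathlib
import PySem

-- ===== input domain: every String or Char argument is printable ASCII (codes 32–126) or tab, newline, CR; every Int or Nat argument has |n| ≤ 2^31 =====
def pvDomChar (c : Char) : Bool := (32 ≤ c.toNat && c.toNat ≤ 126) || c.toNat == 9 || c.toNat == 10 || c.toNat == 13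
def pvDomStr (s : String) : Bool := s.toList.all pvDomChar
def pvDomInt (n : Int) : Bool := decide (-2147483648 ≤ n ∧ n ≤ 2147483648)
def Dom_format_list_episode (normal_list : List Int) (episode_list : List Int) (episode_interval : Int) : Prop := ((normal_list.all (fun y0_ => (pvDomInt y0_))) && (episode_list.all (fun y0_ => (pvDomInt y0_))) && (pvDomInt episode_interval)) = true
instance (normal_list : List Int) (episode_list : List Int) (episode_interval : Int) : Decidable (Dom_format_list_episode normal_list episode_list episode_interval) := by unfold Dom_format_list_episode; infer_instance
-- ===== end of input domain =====

-- B replaces A's nested chunk-copy loop (mutable count/count_interval/interval bookkeeping) by one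
-- flat pass computing each output element as episode_list[i // episode_interval]; objective: simpler.

-- ===== PORT A =====
-- A's while loop, step for step: state (count, count_interval, episode_interval, temp_list).
-- Fuel only makes the recursion total; inside Pre_ (0 < episode_interval when normal_list ≠ [])
-- the loop runs at most normal_list.length iterations, so fuel never runs out there.
-- episode_list[count_interval]: Pre_ guarantees the index is in range, so the .getD 0 default is never taken.
def fleLoopA (n : Int) (ep : List Int) : Nat → Int → Nat → Int → List Int → List Int
  | 0, _, _, _, acc => acc
  | Nat.succ fuel, count, count_interval, episode_interval, acc =>
    if count < n then
      let previous_count := count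
      let count' := count + episode_interval
      let interval' := if count' > n then n - previous_count else episode_interval
      let acc' := (PySem.List.pyRange 0 interval' 1).foldl
                    (fun a _ => a ++ [(PySem.List.pyGet? ep (count_interval : Int)).getD 0]) acc
      fleLoopA n ep fuel count' (count_interval + 1) interval' acc'
    else acc

def format_list_episode (normal_list : List Int) (episode_list : List Int) (episode_interval : Int) : List Int :=
  fleLoopA (normal_list.length : Int) episode_list (normal_list.length + 1) 0 0 episode_interval []

-- ===== PORT B =====
-- one flat pass: [episode_list[i // episode_interval] for i in range(len(normal_list))]
-- (pyGet? … getD 0: Pre_ guarantees the index is in range, so the default is never taken)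
def format_list_episode_alt (normal_list : List Int) (episode_list : List Int) (episode_interval : Int) : List Int :=
  (List.range normal_list.length).map
    (fun (i : Nat) => (PySem.List.pyGet? episode_list (PySem.Int.floordiv (i : Int) episode_interval)).getD 0)

-- ===== PRECONDITION & SPEC =====
-- Pre_ excludes exactly the inputs where Python A does not return: episode_interval ≤ 0 with a
-- nonempty normal_list (A loops forever), and an episode_list too short for the
-- ceil(len(normal_list)/episode_interval) chunks A reads (A raises IndexError).
def Pre_format_list_episode (normal_list : List Int) (episode_list : List Int) (episode_interval : Int) : Prop :=
  normal_list = [] ∨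
    (0 < episode_interval ∧
      (normal_list.length - 1) / episode_interval.toNat < episode_list.length)
instance (normal_list : List Int) (episode_list : List Int) (episode_interval : Int) : Decidable (Pre_format_list_episode normal_list episode_list episode_interval) := by unfold Pre_format_list_episode; infer_instance

def pvWitness_format_list_episode : List Int × List Int × Int := ([7, 8, 9, 10, 11], [3, 4], 3)

def Spec_format_list_episode (normal_list : List Int) (episode_list : List Int) (episode_interval : Int) (out : List Int) : Prop := out = format_list_episode_alt normal_list episode_list episode_interval
instance (normal_list : List Int) (episode_list : List Int) (episode_interval : Int) (out : List Int) : Decidable (Spec_format_list_episode normal_list episode_list episode_interval out) := by unfold Spec_format_list_episode; infer_instance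

-- ===== CLAIM (what is proved, stated in full; the proofs are below) =====
def Claim_equal_format_list_episode : Prop := ∀ (normal_list : List Int) (episode_list : List Int) (episode_interval : Int), Dom_format_list_episode normal_list episode_list episode_interval → Pre_format_list_episode normal_list episode_list episode_interval → Spec_format_list_episode normal_list episode_list episode_interval (format_list_episode normal_list episode_list episode_interval)

-- ===== LEMMAS AND PROOFS =====

-- the element B writes at position i
def fleElem (ep : List Int) (k : Int) (i : Nat) : Int :=
  (PySem.List.pyGet? ep (PySem.Int.floordiv (i : Int) k)).getD 0

-- A's inner for-loop appends interval'.toNat copies of ep[ci]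
theorem fleInner (ep : List Int) (r : Int) (ci : Nat) (acc : List Int) :
    (PySem.List.pyRange 0 r 1).foldl
      (fun a _ => a ++ [(PySem.List.pyGet? ep (ci : Int)).getD 0]) acc
    = acc ++ List.replicate r.toNat ((PySem.List.pyGet? ep (ci : Int)).getD 0) := by
  rw [PySem.List.foldl_append_singleton_eq_map]
  congr 1
  rw [List.map_const']
  simp [PySem.List.length_pyRange_one]

-- for ci*kn ≤ i < (ci+1)*kn, B's element at i is ep[ci]
theorem fleElem_chunk (ep : List Int) (kn ci i : Nat)
    (h1 : ci * kn ≤ i) (h2 : i < (ci + 1) * kn) :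
    fleElem ep (kn : Int) i = (PySem.List.pyGet? ep (ci : Int)).getD 0 := by
  unfold fleElem
  rw [PySem.Int.floordiv_natCast]
  congr 3
  exact Nat.div_eq_of_lt_le h1 h2

-- main loop invariant: at state (count = ci*kn, ci), A's loop produces B's remaining elements
theorem fleLoop_eq (n : Nat) (ep : List Int) (kn : Nat) :
    ∀ (fuel ci : Nat) (acc : List Int), n ≤ ci * kn + fuel * kn →
      fleLoopA (n : Int) ep fuel ((ci * kn : Nat) : Int) ci (kn : Int) acc
        = acc ++ (List.range' (ci * kn) (n - ci * kn)).map (fleElem ep (kn : Int)) := by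
  intro fuel
  induction fuel with
  | zero =>
    intro ci acc hle
    have : n - ci * kn = 0 := by omega
    simp [fleLoopA, this]
  | succ fuel ih =>
    intro ci acc hle
    simp only [fleLoopA]
    by_cases hlt : ci * kn < n
    · have hpos : ((ci * kn : Nat) : Int) < (n : Int) := by exact_mod_cast hlt
      rw [if_pos hpos]
      by_cases hbig : (n : Int) < ((ci * kn : Nat) : Int) + (kn : Int)
      · -- final, shortened chunk: count' > n, loop body runs once more then exits
        have hbig' : n < ci * kn + kn := by exact_mod_cast hbig
        have hck : (ci + 1) * kn = ci * kn + kn := by ring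
        rw [if_pos (show ((ci * kn : Nat) : Int) + (kn : Int) > (n : Int) from hbig)]
        rw [fleInner]
        have hr : ((n : Int) - ((ci * kn : Nat) : Int)).toNat = n - ci * kn := by omega
        rw [hr]
        have hstop : fleLoopA (n : Int) ep fuel (((ci * kn : Nat) : Int) + (kn : Int)) (ci + 1)
            ((n : Int) - ((ci * kn : Nat) : Int))
            (acc ++ List.replicate (n - ci * kn) ((PySem.List.pyGet? ep (ci : Int)).getD 0))
            = acc ++ List.replicate (n - ci * kn) ((PySem.List.pyGet? ep (ci : Int)).getD 0) := by
          cases fuel with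
          | zero => rfl
          | succ m =>
            rw [fleLoopA]
            rw [if_neg (by omega)]
        rw [hstop]
        congr 1
        symm
        rw [List.eq_replicate_iff]
        refine ⟨by simp, ?_⟩
        intro b hb
        rw [List.mem_map] at hb
        obtain ⟨i, hi, hbe⟩ := hb
        rw [List.mem_range'] at hi
        obtain ⟨j, hj, hij⟩ := hi
        subst hbe
        exact fleElem_chunk ep kn ci i (by omega) (by omega)
      · -- full chunk: count' ≤ n, recurse
        have hsmall : ci * kn + kn ≤ n := by
          have : ¬ n < ci * kn + kn := by
            intro hcon
            exact hbig (by exact_mod_cast hcon)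
          omega
        rw [if_neg (show ¬ ((ci * kn : Nat) : Int) + (kn : Int) > (n : Int) from hbig)]
        rw [fleInner]
        have hck : (ci + 1) * kn = ci * kn + kn := by ring
        have hc : ((ci * kn : Nat) : Int) + (kn : Int) = (((ci + 1) * kn : Nat) : Int) := by
          push_cast; ring
        rw [hc, Int.toNat_natCast]
        have hfl : (fuel + 1) * kn = kn + fuel * kn := by ring
        rw [ih (ci + 1) _ (by omega)]
        rw [List.append_assoc]
        congr 1
        have hrlen : n - ci * kn = kn + (n - (ci + 1) * kn) := by omega
        have hsplit : List.range' (ci * kn) (n - ci * kn)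
            = List.range' (ci * kn) kn ++ List.range' (ci * kn + kn) (n - (ci + 1) * kn) := by
          rw [hrlen, ← List.range'_append]
          simp
        rw [hsplit, List.map_append, hck]
        congr 1
        symm
        rw [List.eq_replicate_iff]
        refine ⟨by simp, ?_⟩
        intro b hb
        rw [List.mem_map] at hb
        obtain ⟨i, hi, hbe⟩ := hb
        rw [List.mem_range'] at hi
        obtain ⟨j, hj, hij⟩ := hi
        subst hbe
        exact fleElem_chunk ep kn ci i (by omega) (by omega)
    · rw [if_neg (show ¬ ((ci * kn : Nat) : Int) < (n : Int) by exact_mod_cast hlt)]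
      have : n - ci * kn = 0 := by omega
      simp [this]

-- ===== VERDICT (by name: the statement is the Claim_ definition above) =====
theorem format_list_episode_spec : Claim_equal_format_list_episode := by
  intro nl ep k _ hpre
  unfold Spec_format_list_episode format_list_episode format_list_episode_alt
  rcases hpre with hnil | ⟨hk, _⟩
  · subst hnil; rfl
  · have hkn : k = ((k.toNat : Nat) : Int) := by omega
    have hk0 : 0 < k.toNat := by omega
    rw [hkn]
    have h := fleLoop_eq nl.length ep k.toNat (nl.length + 1) 0 []
      (by nlinarith [hk0])
    simp only [Nat.zero_mul, Nat.cast_zero, Nat.sub_zero] at h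
    rw [h, List.nil_append, ← List.range_eq_range']
    rfl
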